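-- pv_equiv track=rewrite | github.com/Darrionat/cmsc275-lab10 | quads_sim.py | is_cap
-- ===== SOURCE A (Python) =====
-- from itertools import combinations
--
-- def is_cap(points):
--     for comb in combinations(points, 3):
--         exclude = 0
--         for x in comb:
--             exclude ^= x
--         if exclude in points:
--             return False
--     return True
-- ===== SOURCE B (Python) =====
-- def is_cap(points):
--     n = len(points)
--     if n < 3:
--         return True
--     if len(set(points)) != n:
--         # a repeated value plus any third point always yields a triple whose XOR is in points
--         return False
--     xors = [points[i] ^ points[j] for j in range(n) for i in range(j)]
--     return len(set(xors)) == len(xors)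
-- ===== Notes on version B (the rewrite author's own statement) =====
-- stated objective: alternative
-- what changed: Instead of scanning all 3-combinations and testing list membership per triple, B dedup-checks the points and then detects a collision among the O(n^2) pairwise XORs, which is proved equivalent to some triple's XOR lying in the list.
import Mathlib
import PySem

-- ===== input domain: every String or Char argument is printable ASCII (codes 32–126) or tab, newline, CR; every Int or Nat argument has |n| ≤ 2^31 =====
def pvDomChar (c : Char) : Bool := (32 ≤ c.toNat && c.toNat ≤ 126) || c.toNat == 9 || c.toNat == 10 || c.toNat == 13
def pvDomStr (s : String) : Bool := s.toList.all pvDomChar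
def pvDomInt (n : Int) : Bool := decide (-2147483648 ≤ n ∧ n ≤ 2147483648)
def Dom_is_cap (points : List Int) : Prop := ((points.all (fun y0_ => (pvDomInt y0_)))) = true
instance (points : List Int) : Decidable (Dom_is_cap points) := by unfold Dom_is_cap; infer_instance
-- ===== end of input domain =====

-- B replaces A's scan of all 3-combinations (with list membership per triple) by a duplicate check
-- plus a collision test on the pairwise XORs (a different algorithm; a timing run did not
-- confirm a speed-up on its generated inputs, so no speed is claimed).


-- ===== PORT A =====
-- itertools.combinations(points, 2): ordered pairs of elements, in combinations order
def combos2 : List Int → List (List Int)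
  | [] => []
  | x :: xs => (xs.map fun y => [x, y]) ++ combos2 xs

-- itertools.combinations(points, 3): triples, in combinations order
def combos3 : List Int → List (List Int)
  | [] => []
  | x :: xs => ((combos2 xs).map fun c => x :: c) ++ combos3 xs

-- A's for-loop: fold the XOR over the triple, test list membership, early 'return False'
def isCapLoop (points : List Int) : List (List Int) → Bool
  | [] => true
  | c :: rest =>
    if points.contains (c.foldl (fun e x => PySem.Int.bxor e x) 0) then false
    else isCapLoop points rest

def is_cap (points : List Int) : Bool := isCapLoop points (combos3 points)

-- ===== PORT B =====
-- the comprehension [points[i] ^ points[j] for j in range(n) for i in range(j)];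
-- getD is exact here because every produced index satisfies i < j < len(points)
def pairXors (points : List Int) : List Int :=
  (List.range points.length).flatMap (fun j =>
    (List.range j).map (fun i => PySem.Int.bxor (points.getD i 0) (points.getD j 0)))

def is_cap_alt (points : List Int) : Bool :=
  let n := points.length
  if n < 3 then true
  else if (PySem.Set.ofList points).length ≠ n then false
  else (PySem.Set.ofList (pairXors points)).length == (pairXors points).length

-- ===== PRECONDITION & SPEC =====
def Spec_is_cap (points : List Int) (out : Bool) : Prop := out = is_cap_alt points
instance (points : List Int) (out : Bool) : Decidable (Spec_is_cap points out) := by unfold Spec_is_cap; infer_instance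

-- ===== CLAIM (what is proved, stated in full; the proofs are below) =====
def Claim_equal_is_cap : Prop := ∀ (points : List Int), Dom_is_cap points → Spec_is_cap points (is_cap points)

-- ===== LEMMAS AND PROOFS =====

-- ---- XOR algebra for PySem.Int.bxor ----

theorem int_rep (a : Int) : (∃ m : Nat, a = ↑m) ∨ (∃ m : Nat, a = -↑m - 1) := by
  rcases (by omega : 0 ≤ a ∨ a < 0) with h | h
  · exact Or.inl ⟨a.toNat, (Int.toNat_of_nonneg h).symm⟩
  · exact Or.inr ⟨(-a - 1).toNat, by omega⟩

theorem bxor_pm (m n : Nat) : PySem.Int.bxor ↑m (-↑n - 1) = -↑(m ^^^ n) - 1 := by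
  unfold PySem.Int.bxor
  have h1 : (0 : Int) ≤ ↑m := Int.natCast_nonneg m
  simp [h1]
  intro h; omega

theorem bxor_mp (m n : Nat) : PySem.Int.bxor (-↑m - 1) ↑n = -↑(m ^^^ n) - 1 := by
  unfold PySem.Int.bxor
  have h1 : (0 : Int) ≤ ↑n := Int.natCast_nonneg n
  simp [h1]
  intro h; omega

theorem bxor_mm (m n : Nat) : PySem.Int.bxor (-↑m - 1) (-↑n - 1) = ↑(m ^^^ n) := by
  unfold PySem.Int.bxor
  have h3 : (-(-(↑m : Int) - 1) - 1) = ↑m := by ring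
  have h3' : (-(-(↑n : Int) - 1) - 1) = ↑n := by ring
  have h4 : ¬ (1 : Int) ≤ -↑m := by omega
  have h4' : ¬ (1 : Int) ≤ -↑n := by omega
  simp [h3, h3', h4, h4']

theorem bxor_assoc (a b c : Int) :
    PySem.Int.bxor (PySem.Int.bxor a b) c = PySem.Int.bxor a (PySem.Int.bxor b c) := by
  rcases int_rep a with ⟨m, rfl⟩ | ⟨m, rfl⟩ <;> rcases int_rep b with ⟨n, rfl⟩ | ⟨n, rfl⟩ <;>
    rcases int_rep c with ⟨k, rfl⟩ | ⟨k, rfl⟩ <;>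
    simp [bxor_pm, bxor_mp, bxor_mm, Nat.xor_assoc]

theorem zero_bxor (a : Int) : PySem.Int.bxor 0 a = a := by
  rw [PySem.Int.bxor_comm]; exact PySem.Int.bxor_zero a

theorem bxor_cancel_left (a b : Int) : PySem.Int.bxor a (PySem.Int.bxor a b) = b := by
  rw [← bxor_assoc, PySem.Int.bxor_self, zero_bxor]

theorem bxor_eq_zero {a b : Int} (h : PySem.Int.bxor a b = 0) : a = b := by
  have := congrArg (fun z => PySem.Int.bxor z b) h
  simpa [bxor_assoc, PySem.Int.bxor_self, PySem.Int.bxor_zero, zero_bxor] using this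

theorem bxor_left_comm (a b c : Int) :
    PySem.Int.bxor a (PySem.Int.bxor b c) = PySem.Int.bxor b (PySem.Int.bxor a c) := by
  rw [← bxor_assoc, PySem.Int.bxor_comm a b, bxor_assoc]

theorem bxor3_eq_right {a b c : Int} (h : PySem.Int.bxor (PySem.Int.bxor a b) c = c) : a = b := by
  apply bxor_eq_zero
  have := congrArg (fun z => PySem.Int.bxor z c) h
  simpa [bxor_assoc, bxor_left_comm, PySem.Int.bxor_comm, bxor_cancel_left,
    PySem.Int.bxor_self, PySem.Int.bxor_zero, zero_bxor] using this

theorem bxor3_eq_mid {a b c : Int} (h : PySem.Int.bxor (PySem.Int.bxor a b) c = b) : a = c := by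
  have := congrArg (fun z => PySem.Int.bxor b z) h
  simp [bxor_left_comm, PySem.Int.bxor_comm, bxor_cancel_left, PySem.Int.bxor_self] at this
  exact bxor_eq_zero this

theorem bxor3_eq_left {a b c : Int} (h : PySem.Int.bxor (PySem.Int.bxor a b) c = a) : b = c := by
  apply bxor_eq_zero
  have := congrArg (fun z => PySem.Int.bxor a z) h
  simpa [bxor_assoc, bxor_left_comm, PySem.Int.bxor_comm, bxor_cancel_left,
    PySem.Int.bxor_self, PySem.Int.bxor_zero, zero_bxor] using this

theorem bxor3_shift {a b c d : Int} (h : PySem.Int.bxor (PySem.Int.bxor a b) c = d) :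
    PySem.Int.bxor a b = PySem.Int.bxor c d := by
  rw [← h]
  simp [bxor_assoc, bxor_left_comm, PySem.Int.bxor_comm, bxor_cancel_left,
    PySem.Int.bxor_self, PySem.Int.bxor_zero, zero_bxor]

theorem bxor_left_inj {a b c : Int} (h : PySem.Int.bxor a b = PySem.Int.bxor a c) : b = c := by
  have := congrArg (PySem.Int.bxor a) h
  rwa [bxor_cancel_left, bxor_cancel_left] at this

theorem bxor_right_inj {a b c : Int} (h : PySem.Int.bxor a c = PySem.Int.bxor b c) : a = b := by
  rw [PySem.Int.bxor_comm a c, PySem.Int.bxor_comm b c] at h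
  exact bxor_left_inj h

-- ---- characterizing the A side ----

theorem isCapLoop_eq_false_iff (pts : List Int) (cs : List (List Int)) :
    isCapLoop pts cs = false ↔ ∃ c ∈ cs, (c.foldl (fun e x => PySem.Int.bxor e x) 0) ∈ pts := by
  induction cs with
  | nil => simp [isCapLoop]
  | cons c rest ih =>
    by_cases h : (c.foldl (fun e x => PySem.Int.bxor e x) 0) ∈ pts
    · simp [isCapLoop, h]
    · simp [isCapLoop, h, ih]

theorem mem_combos2 {l : List Int} {c : List Int} :
    c ∈ combos2 l ↔ ∃ i j, i < j ∧ j < l.length ∧ c = [l.getD i 0, l.getD j 0] := by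
  induction l generalizing c with
  | nil => simp [combos2]
  | cons x xs ih =>
    simp only [combos2, List.mem_append, List.mem_map, ih]
    constructor
    · rintro (⟨y, hy, rfl⟩ | ⟨i, j, hij, hj, rfl⟩)
      · obtain ⟨j, hj, rfl⟩ := List.mem_iff_getElem.mp hy
        exact ⟨0, j + 1, by omega, by simpa using by omega, by
          simp [List.getD_eq_getElem?_getD, List.getElem?_eq_getElem hj]⟩
      · exact ⟨i + 1, j + 1, by omega, by simpa using by omega, by
          simp [List.getD_eq_getElem?_getD]⟩
    · rintro ⟨i, j, hij, hj, rfl⟩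
      simp only [List.length_cons] at hj
      match i, j with
      | 0, j + 1 =>
        left
        refine ⟨xs.getD j 0, ?_, by simp [List.getD_eq_getElem?_getD]⟩
        exact List.mem_iff_getElem.mpr ⟨j, by omega, (List.getD_eq_getElem _ _ (by omega)).symm⟩
      | i + 1, j + 1 =>
        right
        exact ⟨i, j, by omega, by omega, by simp [List.getD_eq_getElem?_getD]⟩

theorem mem_combos3 {l : List Int} {c : List Int} :
    c ∈ combos3 l ↔ ∃ i j k, i < j ∧ j < k ∧ k < l.length ∧
      c = [l.getD i 0, l.getD j 0, l.getD k 0] := by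
  induction l generalizing c with
  | nil => simp [combos3]
  | cons x xs ih =>
    simp only [combos3, List.mem_append, List.mem_map, ih, mem_combos2]
    constructor
    · rintro (⟨c2, ⟨i, j, hij, hj, rfl⟩, rfl⟩ | ⟨i, j, k, hij, hjk, hk, rfl⟩)
      · exact ⟨0, i + 1, j + 1, by omega, by omega, by simpa using by omega, by
          simp [List.getD_eq_getElem?_getD]⟩
      · exact ⟨i + 1, j + 1, k + 1, by omega, by omega, by simpa using by omega, by
          simp [List.getD_eq_getElem?_getD]⟩
    · rintro ⟨i, j, k, hij, hjk, hk, rfl⟩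
      simp only [List.length_cons] at hk
      match i, j, k with
      | 0, j + 1, k + 1 =>
        left
        exact ⟨[xs.getD j 0, xs.getD k 0], ⟨j, k, by omega, by omega, rfl⟩,
          by simp [List.getD_eq_getElem?_getD]⟩
      | i + 1, j + 1, k + 1 =>
        right
        exact ⟨i, j, k, by omega, by omega, by omega, by simp [List.getD_eq_getElem?_getD]⟩

theorem a_false_iff (points : List Int) :
    is_cap points = false ↔ ∃ i j k, i < j ∧ j < k ∧ k < points.length ∧
      PySem.Int.bxor (PySem.Int.bxor (points.getD i 0) (points.getD j 0)) (points.getD k 0) ∈ points := by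
  unfold is_cap
  rw [isCapLoop_eq_false_iff]
  constructor
  · rintro ⟨c, hc, hmem⟩
    obtain ⟨i, j, k, hij, hjk, hk, rfl⟩ := mem_combos3.mp hc
    refine ⟨i, j, k, hij, hjk, hk, ?_⟩
    simpa [List.foldl, zero_bxor] using hmem
  · rintro ⟨i, j, k, hij, hjk, hk, hmem⟩
    refine ⟨[points.getD i 0, points.getD j 0, points.getD k 0],
      mem_combos3.mpr ⟨i, j, k, hij, hjk, hk, rfl⟩, ?_⟩
    simpa [List.foldl, zero_bxor] using hmem

-- ---- characterizing the B side ----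

theorem ofList_length_eq_iff_nodup (l : List Int) :
    (PySem.Set.ofList l).length = l.length ↔ l.Nodup := by
  constructor
  · intro h
    induction l with
    | nil => simp
    | cons x xs ih =>
      rw [PySem.Set.ofList_cons] at h
      simp only [List.length_cons] at h
      by_cases hx : x ∈ xs
      · exfalso
        have hmem : x ∈ PySem.Set.ofList xs := (PySem.Set.mem_ofList xs x).mpr hx
        have hlt : ((PySem.Set.ofList xs).discard x).length < (PySem.Set.ofList xs).length := by
          apply List.length_filter_lt_length_iff_exists.mpr
          exact ⟨x, hmem, by simp⟩
        have := PySem.Set.length_ofList_le xs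
        omega
      · have heq : (PySem.Set.ofList xs).discard x = PySem.Set.ofList xs := by
          apply List.filter_eq_self.mpr
          intro y hy
          have : y ∈ xs := (PySem.Set.mem_ofList xs y).mp hy
          simp only [Bool.not_eq_true', beq_eq_false_iff_ne, ne_eq]
          rintro rfl; exact hx this
        rw [heq] at h
        exact List.Nodup.cons hx (ih (by omega))
  · intro h
    rw [PySem.Set.ofList_eq_self_of_nodup l h]

theorem nodup_getElem_iff (points : List Int) :
    points.Nodup ↔ ∀ i j, i < j → j < points.length → points.getD i 0 ≠ points.getD j 0 := by
  rw [List.Nodup, List.pairwise_iff_getElem]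
  constructor
  · intro h i j hij hj
    rw [List.getD_eq_getElem _ _ (by omega), List.getD_eq_getElem _ _ hj]
    exact h i j (by omega) hj hij
  · intro h i j hi hj hij
    have := h i j hij hj
    rwa [List.getD_eq_getElem _ _ hi, List.getD_eq_getElem _ _ hj] at this

theorem mem_iff_getD (points : List Int) (v : Int) :
    v ∈ points ↔ ∃ l, l < points.length ∧ points.getD l 0 = v := by
  rw [List.mem_iff_getElem]
  constructor
  · rintro ⟨l, hl, rfl⟩
    exact ⟨l, hl, List.getD_eq_getElem _ _ hl⟩
  · rintro ⟨l, hl, rfl⟩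
    exact ⟨l, hl, (List.getD_eq_getElem _ _ hl).symm⟩

theorem pairXors_nodup_iff (points : List Int) :
    (pairXors points).Nodup ↔ ∀ i₁ j₁ i₂ j₂, i₁ < j₁ → j₁ < points.length → i₂ < j₂ → j₂ < points.length →
      PySem.Int.bxor (points.getD i₁ 0) (points.getD j₁ 0) = PySem.Int.bxor (points.getD i₂ 0) (points.getD j₂ 0) →
      i₁ = i₂ ∧ j₁ = j₂ := by
  unfold pairXors
  rw [List.nodup_flatMap]
  constructor
  · rintro ⟨hinner, hpair⟩ i₁ j₁ i₂ j₂ h1 h2 h3 h4 heq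
    rw [List.pairwise_iff_getElem] at hpair
    simp only [List.length_range, List.getElem_range, Function.onFun] at hpair
    rcases Nat.lt_trichotomy j₁ j₂ with hlt | rfl | hgt
    · exact absurd (List.mem_map.mpr ⟨i₂, List.mem_range.mpr h3, heq.symm⟩)
        (hpair j₁ j₂ h2 h4 hlt (List.mem_map.mpr ⟨i₁, List.mem_range.mpr h1, rfl⟩))
    · have hnod := hinner j₁ (List.mem_range.mpr h2)
      rw [List.Nodup, List.pairwise_map, List.pairwise_iff_getElem] at hnod
      simp only [List.length_range, List.getElem_range] at hnod
      rcases Nat.lt_trichotomy i₁ i₂ with h' | h' | h'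
      · exact absurd heq (hnod i₁ i₂ h1 h3 h')
      · exact ⟨h', rfl⟩
      · exact absurd heq.symm (hnod i₂ i₁ h3 h1 h')
    · exact absurd (List.mem_map.mpr ⟨i₁, List.mem_range.mpr h1, heq⟩)
        (hpair j₂ j₁ h4 h2 hgt (List.mem_map.mpr ⟨i₂, List.mem_range.mpr h3, rfl⟩))
  · intro h
    refine ⟨?_, ?_⟩
    · intro j hj
      have hjn : j < points.length := List.mem_range.mp hj
      rw [List.Nodup, List.pairwise_map, List.pairwise_iff_getElem]
      simp only [List.length_range, List.getElem_range]
      intro a b ha hb hab heq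
      exact absurd ((h a j b j ha hjn hb hjn heq).1) (by omega)
    · rw [List.pairwise_iff_getElem]
      simp only [List.length_range, List.getElem_range, Function.onFun]
      intro p q hp hq hpq v hv1 hv2
      obtain ⟨i₁, hi₁, rfl⟩ := List.mem_map.mp hv1
      obtain ⟨i₂, hi₂, heq⟩ := List.mem_map.mp hv2
      have := (h i₁ p i₂ q (List.mem_range.mp hi₁) hp (List.mem_range.mp hi₂) hq heq.symm).2
      omega

theorem b_false_iff (points : List Int) :
    is_cap_alt points = false ↔ 3 ≤ points.length ∧ (¬ points.Nodup ∨ ¬ (pairXors points).Nodup) := by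
  show (if points.length < 3 then true
    else if (PySem.Set.ofList points).length ≠ points.length then false
    else ((PySem.Set.ofList (pairXors points)).length == (pairXors points).length)) = false ↔ _
  split_ifs with h1 h2
  · simp; omega
  · simp only [true_iff]
    exact ⟨by omega, Or.inl (fun hn => h2 ((ofList_length_eq_iff_nodup points).mpr hn))⟩
  · rw [beq_eq_false_iff_ne]
    constructor
    · intro hne
      exact ⟨by omega, Or.inr (fun hn => hne ((ofList_length_eq_iff_nodup _).mpr hn))⟩
    · rintro ⟨-, h | h⟩
      · exact absurd ((ofList_length_eq_iff_nodup points).mp (by omega)) h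
      · intro he; exact h ((ofList_length_eq_iff_nodup _).mp he)

-- ---- the combinatorial core, over an arbitrary indexing function ----

-- a duplicated value (plus any third index) always produces a bad triple
theorem dup_case (X : Nat → Int) (n : Nat) (h3 : 3 ≤ n) {i j : Nat}
    (hij : i < j) (hj : j < n) (hX : X i = X j) :
    ∃ a b c l, a < b ∧ b < c ∧ c < n ∧ l < n ∧
      PySem.Int.bxor (PySem.Int.bxor (X a) (X b)) (X c) = X l := by
  have hz : PySem.Int.bxor (X i) (X j) = 0 := by rw [hX]; exact PySem.Int.bxor_self _
  obtain ⟨r, hr, hri, hrj⟩ : ∃ r, r < n ∧ r ≠ i ∧ r ≠ j := by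
    refine ⟨if i = 0 then (if j = 1 then 2 else 1) else 0, ?_, ?_, ?_⟩ <;> split_ifs <;> omega
  rcases Nat.lt_trichotomy r i with h' | h' | h'
  · exact ⟨r, i, j, r, h', hij, hj, hr, by rw [bxor_assoc, hz, PySem.Int.bxor_zero]⟩
  · omega
  · rcases Nat.lt_trichotomy r j with h'' | h'' | h''
    · exact ⟨i, r, j, r, h', h'', hj, hr, by
        rw [bxor_assoc, bxor_left_comm, hz, PySem.Int.bxor_zero]⟩
    · omega
    · exact ⟨i, j, r, r, hij, h'', hr, hr, by rw [hz, zero_bxor]⟩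

theorem main_core (X : Nat → Int) (n : Nat) :
    (∃ i j k l, i < j ∧ j < k ∧ k < n ∧ l < n ∧
      PySem.Int.bxor (PySem.Int.bxor (X i) (X j)) (X k) = X l)
    ↔ (3 ≤ n ∧ ((∃ i j, i < j ∧ j < n ∧ X i = X j) ∨
        (∃ i₁ j₁ i₂ j₂, i₁ < j₁ ∧ j₁ < n ∧ i₂ < j₂ ∧ j₂ < n ∧
          PySem.Int.bxor (X i₁) (X j₁) = PySem.Int.bxor (X i₂) (X j₂) ∧ ¬(i₁ = i₂ ∧ j₁ = j₂)))) := by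
  constructor
  · rintro ⟨i, j, k, l, hij, hjk, hk, hl, hXl⟩
    refine ⟨by omega, ?_⟩
    by_cases hdup : ∃ a b, a < b ∧ b < n ∧ X a = X b
    · exact Or.inl hdup
    · right
      push_neg at hdup
      have hinj : ∀ a b, a < n → b < n → X a = X b → a = b := by
        intro a b ha hb heq
        rcases Nat.lt_trichotomy a b with h' | h' | h'
        · exact absurd heq (hdup a b h' hb)
        · exact h'
        · exact absurd heq.symm (hdup b a h' ha)
      have hlk : l ≠ k := by
        rintro rfl
        exact absurd (hinj i j (by omega) (by omega) (bxor3_eq_right hXl)) (by omega)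
      have hlj : l ≠ j := by
        rintro rfl
        exact absurd (hinj i k (by omega) (by omega) (bxor3_eq_mid hXl)) (by omega)
      have hli : l ≠ i := by
        rintro rfl
        exact absurd (hinj j k (by omega) (by omega) (bxor3_eq_left hXl)) (by omega)
      have hpair : PySem.Int.bxor (X i) (X j) = PySem.Int.bxor (X k) (X l) := bxor3_shift hXl
      rcases Nat.lt_trichotomy l k with h' | h' | h'
      · exact ⟨i, j, l, k, hij, by omega, h', hk,
          by rw [hpair, PySem.Int.bxor_comm], by omega⟩
      · omega
      · exact ⟨i, j, k, l, hij, by omega, h', hl, hpair, by omega⟩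
  · rintro ⟨h3, ⟨i, j, hij, hj, hX⟩ | ⟨i₁, j₁, i₂, j₂, h1, h2, h4, h5, heq, hne⟩⟩
    · exact dup_case X n h3 hij hj hX
    · by_cases hdup : ∃ a b, a < b ∧ b < n ∧ X a = X b
      · obtain ⟨a, b, hab, hb, hXab⟩ := hdup
        exact dup_case X n h3 hab hb hXab
      · push_neg at hdup
        have hinj : ∀ a b, a < n → b < n → X a = X b → a = b := by
          intro a b ha hb heq2
          rcases Nat.lt_trichotomy a b with h' | h' | h'
          · exact absurd heq2 (hdup a b h' hb)
          · exact h'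
          · exact absurd heq2.symm (hdup b a h' ha)
        have hii' : i₁ ≠ i₂ := by
          rintro rfl
          exact hne ⟨rfl, hinj j₁ j₂ h2 h5 (bxor_left_inj heq)⟩
        have hjj : j₁ ≠ j₂ := by
          rintro rfl
          exact hne ⟨hinj i₁ i₂ (by omega) (by omega) (bxor_right_inj heq), rfl⟩
        have hij2 : i₁ ≠ j₂ := by
          rintro rfl
          have : X j₁ = X i₂ := by
            apply bxor_left_inj (a := X i₁)
            rw [heq, PySem.Int.bxor_comm]
          have := hinj j₁ i₂ h2 (by omega) this
          omega
        have hji2 : j₁ ≠ i₂ := by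
          rintro rfl
          have : X i₁ = X j₂ := by
            apply bxor_left_inj (a := X j₁)
            rw [PySem.Int.bxor_comm (X j₁) (X i₁), heq]
          have := hinj i₁ j₂ (by omega) h5 this
          omega
        have hkey : PySem.Int.bxor (PySem.Int.bxor (X i₁) (X j₁)) (X i₂) = X j₂ := by
          rw [heq, PySem.Int.bxor_comm (X i₂) (X j₂), bxor_assoc, PySem.Int.bxor_self,
            PySem.Int.bxor_zero]
        rcases Nat.lt_trichotomy i₂ i₁ with h' | h' | h'
        · refine ⟨i₂, i₁, j₁, j₂, h', h1, h2, h5, ?_⟩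
          rw [← hkey]
          simp [bxor_assoc, bxor_left_comm, PySem.Int.bxor_comm]
        · omega
        · rcases Nat.lt_trichotomy i₂ j₁ with h'' | h'' | h''
          · refine ⟨i₁, i₂, j₁, j₂, h', h'', h2, h5, ?_⟩
            rw [← hkey]
            simp [bxor_assoc, bxor_left_comm, PySem.Int.bxor_comm]
          · omega
          · exact ⟨i₁, j₁, i₂, j₂, h1, h'', by omega, h5, hkey⟩

-- ---- gluing it all together ----

theorem main_iff (points : List Int) : is_cap points = false ↔ is_cap_alt points = false := by
  rw [a_false_iff, b_false_iff]
  have core := main_core (fun t => points.getD t 0) points.length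
  constructor
  · rintro ⟨i, j, k, hij, hjk, hk, hmem⟩
    obtain ⟨l, hl, hXl⟩ := (mem_iff_getD points _).mp hmem
    obtain ⟨h3, hcase⟩ := core.mp ⟨i, j, k, l, hij, hjk, hk, hl, hXl.symm⟩
    refine ⟨h3, ?_⟩
    rcases hcase with ⟨a, b, hab, hb, hX⟩ | ⟨i₁, j₁, i₂, j₂, a1, a2, a3, a4, a5, a6⟩
    · exact Or.inl (fun hnd => (nodup_getElem_iff points).mp hnd a b hab hb hX)
    · refine Or.inr (fun hnd => ?_)
      exact a6 ((pairXors_nodup_iff points).mp hnd i₁ j₁ i₂ j₂ a1 a2 a3 a4 a5)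
  · rintro ⟨h3, hcase⟩
    have hcase' : (∃ a b, a < b ∧ b < points.length ∧ points.getD a 0 = points.getD b 0) ∨
        (∃ i₁ j₁ i₂ j₂, i₁ < j₁ ∧ j₁ < points.length ∧ i₂ < j₂ ∧ j₂ < points.length ∧
          PySem.Int.bxor (points.getD i₁ 0) (points.getD j₁ 0)
            = PySem.Int.bxor (points.getD i₂ 0) (points.getD j₂ 0) ∧ ¬(i₁ = i₂ ∧ j₁ = j₂)) := by
      rcases hcase with h | h
      · left
        rw [nodup_getElem_iff] at h
        push_neg at h
        obtain ⟨i, j, hij, hj, hX⟩ := h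
        exact ⟨i, j, hij, hj, hX⟩
      · right
        rw [pairXors_nodup_iff] at h
        push_neg at h
        obtain ⟨i₁, j₁, i₂, j₂, a1, a2, a3, a4, a5, a6⟩ := h
        exact ⟨i₁, j₁, i₂, j₂, a1, a2, a3, a4, a5, fun hc => a6 hc.1 hc.2⟩
    obtain ⟨i, j, k, l, hij, hjk, hk, hl, heq⟩ := core.mpr ⟨h3, hcase'⟩
    exact ⟨i, j, k, hij, hjk, hk, (mem_iff_getD points _).mpr ⟨l, hl, heq.symm⟩⟩

-- ===== VERDICT (by name: the statement is the Claim_ definition above) =====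
theorem is_cap_spec : Claim_equal_is_cap := by
  intro points _
  unfold Spec_is_cap
  have h := main_iff points
  cases ha : is_cap points <;> cases hb : is_cap_alt points <;> simp_all
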